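-- pv_equiv track=rewrite | github.com/zenniskayy2k4/CTF-Archive | amateursCTF/normal-java-code/solve.py | check_polynomial
-- ===== SOURCE A (Python) =====
-- def u64(n):
--     n = n % (2**64)
--     if n >= 2**63:
--         n -= 2**64
--     return n
--
-- def check_polynomial(x, block):
--     s = 0
--     degree = len(block)
--
--     # Tính giá trị đa thức: C_0*x^n + C_1*x^(n-1) + ...
--     # Phải áp dụng u64() sau MỖI phép tính cộng hoặc nhân
--     for i, coeff in enumerate(block):
--         power = degree - i
--         # Tính x^power
--         term_val = coeff * (x ** power)
--         # Apply overflow cho phép nhân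
--         term_val = u64(term_val)
--
--         # Cộng vào tổng và apply overflow ngay lập tức
--         s = u64(s + term_val)
--
--     return s == 0
-- ===== SOURCE B (Python) =====
-- def check_polynomial(x, block):
--     # Horner evaluation of C_0*x^n + ... + C_{n-1}*x, reducing mod 2**64 each step.
--     M = 2 ** 64
--     h = 0
--     for c in block:
--         h = (h * x + c) % M
--     return h * x % M == 0
-- ===== Notes on version B (the rewrite author's own statement) =====
-- stated objective: faster
-- what changed: Replaced per-term computation of coeff*x**power with huge bigint powers by Horner's rule reduced mod 2**64 at every step (one final multiply by x), keeping all intermediates word-sized.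
import Mathlib
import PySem

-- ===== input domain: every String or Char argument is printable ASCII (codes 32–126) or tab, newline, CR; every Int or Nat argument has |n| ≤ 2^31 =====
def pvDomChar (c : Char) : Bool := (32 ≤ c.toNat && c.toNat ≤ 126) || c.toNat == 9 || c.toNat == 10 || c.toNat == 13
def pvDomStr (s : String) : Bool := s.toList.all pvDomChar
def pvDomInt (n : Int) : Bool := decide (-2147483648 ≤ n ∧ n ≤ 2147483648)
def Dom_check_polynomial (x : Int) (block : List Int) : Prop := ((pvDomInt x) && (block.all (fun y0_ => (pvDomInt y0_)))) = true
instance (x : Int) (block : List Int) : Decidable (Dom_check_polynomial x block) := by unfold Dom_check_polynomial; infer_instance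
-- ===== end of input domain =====

-- B replaces A's per-term bigint powers (quadratic bigint work) by Horner's rule with a
-- mod-2^64 reduction at every step and one final multiplication by x: same Boolean answer, O(n) small-number work.

-- ===== PORT A =====
def pvU64 (n : Int) : Int :=
  let n := PySem.Int.mod n (2 ^ 64)
  if n ≥ 2 ^ 63 then n - 2 ^ 64 else n

def check_polynomial (x : Int) (block : List Int) : Bool :=
  let degree : Int := block.length
  let s :=
    (PySem.List.enumerate block).foldl (fun s p =>
      let power := degree - p.1
      -- x ** power: power = degree - i ≥ 1 on every index reached, so Nat exponentiation is exact
      let term_val := p.2 * x ^ power.toNat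
      let term_val := pvU64 term_val
      pvU64 (s + term_val)) 0
  s == 0

-- ===== PORT B =====
def check_polynomial_alt (x : Int) (block : List Int) : Bool :=
  let M : Int := 2 ^ 64
  let h := block.foldl (fun h c => PySem.Int.mod (h * x + c) M) 0
  PySem.Int.mod (h * x) M == 0

-- ===== PRECONDITION & SPEC =====
def Spec_check_polynomial (x : Int) (block : List Int) (out : Bool) : Prop := out = check_polynomial_alt x block
instance (x : Int) (block : List Int) (out : Bool) : Decidable (Spec_check_polynomial x block out) := by unfold Spec_check_polynomial; infer_instance

-- ===== CLAIM (what is proved, stated in full; the proofs are below) =====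
def Claim_equal_check_polynomial : Prop := ∀ (x : Int) (block : List Int), Dom_check_polynomial x block → Spec_check_polynomial x block (check_polynomial x block)

-- ===== LEMMAS AND PROOFS =====

-- A's loop body (captures x and the fixed degree d)
def pvStepA (x d : Int) (s : Int) (p : Int × Int) : Int :=
  pvU64 (s + pvU64 (p.2 * x ^ (d - p.1).toNat))

-- B's loop body
def pvStepB (x : Int) (h c : Int) : Int := PySem.Int.mod (h * x + c) (2 ^ 64)

-- the exact (unreduced) sum A accumulates, and the exact Horner value B tracks
def pvSum (x d : Int) (l : List (Int × Int)) : Int :=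
  (l.map (fun p => p.2 * x ^ (d - p.1).toNat)).sum

def pvHorner (x h : Int) (l : List Int) : Int := l.foldl (fun h c => h * x + c) h

theorem pvU64_emod (n : Int) : pvU64 n % 2 ^ 64 = n % 2 ^ 64 := by
  simp only [pvU64, PySem.Int.mod_eq_emod_of_pos (show (0:Int) < 2 ^ 64 by norm_num)]
  split_ifs with h
  · rw [Int.sub_emod_right, Int.emod_emod_of_dvd _ dvd_rfl]
  · rw [Int.emod_emod_of_dvd _ dvd_rfl]

theorem pvU64_bounds (n : Int) : -(2 ^ 63) ≤ pvU64 n ∧ pvU64 n < 2 ^ 63 := by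
  have h0 : 0 ≤ n % 2 ^ 64 := Int.emod_nonneg _ (by norm_num)
  have h1 : n % 2 ^ 64 < 2 ^ 64 := Int.emod_lt_of_pos _ (by norm_num)
  simp only [pvU64, PySem.Int.mod_eq_emod_of_pos (show (0:Int) < 2 ^ 64 by norm_num)]
  split_ifs with h <;> omega

theorem pvStepA_emod (x d s t : Int) (p : Int × Int) (h : s % 2 ^ 64 = t % 2 ^ 64) :
    pvStepA x d s p % 2 ^ 64 = (t + p.2 * x ^ (d - p.1).toNat) % 2 ^ 64 := by
  unfold pvStepA
  rw [pvU64_emod]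
  exact Int.ModEq.add h (pvU64_emod _)

theorem foldA_emod (x d : Int) : ∀ (l : List (Int × Int)) (s t : Int), s % 2 ^ 64 = t % 2 ^ 64 →
    (l.foldl (pvStepA x d) s) % 2 ^ 64 = (t + pvSum x d l) % 2 ^ 64 := by
  intro l
  induction l with
  | nil => intro s t h; simpa [pvSum] using h
  | cons p l ih =>
    intro s t h
    have h1 := pvStepA_emod x d s t p h
    have h2 := ih (pvStepA x d s p) (t + p.2 * x ^ (d - p.1).toNat) h1
    simpa [pvSum, List.foldl, add_assoc] using h2

theorem foldA_zero_or_u64 (x d : Int) : ∀ (l : List (Int × Int)) (s : Int),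
    l.foldl (pvStepA x d) s = s ∨ ∃ y, l.foldl (pvStepA x d) s = pvU64 y := by
  intro l
  induction l with
  | nil => intro s; exact Or.inl rfl
  | cons p l ih =>
    intro s
    rcases ih (pvStepA x d s p) with h | ⟨y, hy⟩
    · exact Or.inr ⟨s + pvU64 (p.2 * x ^ (d - p.1).toNat), by simpa [pvStepA] using h⟩
    · exact Or.inr ⟨y, by simpa using hy⟩

theorem foldB_emod (x : Int) : ∀ (l : List Int) (h g : Int), h % 2 ^ 64 = g % 2 ^ 64 →
    (l.foldl (pvStepB x) h) % 2 ^ 64 = pvHorner x g l % 2 ^ 64 := by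
  intro l
  induction l with
  | nil => intro h g hh; simpa [pvHorner] using hh
  | cons c l ih =>
    intro h g hh
    have h1 : pvStepB x h c % 2 ^ 64 = (g * x + c) % 2 ^ 64 := by
      simp only [pvStepB, PySem.Int.mod_eq_emod_of_pos (show (0:Int) < 2 ^ 64 by norm_num)]
      rw [Int.emod_emod_of_dvd _ dvd_rfl]
      exact Int.ModEq.add_right c (Int.ModEq.mul_right x hh)
    simpa [pvHorner, List.foldl] using ih (pvStepB x h c) (g * x + c) h1

theorem pvSum_shift (x : Int) (l : List Int) :
    pvSum x ((l.length : Int) + 1) (PySem.List.enumerate l) = x * pvSum x (l.length : Int) (PySem.List.enumerate l) := by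
  unfold pvSum
  rw [← List.sum_map_mul_left]
  congr 1
  apply List.map_congr_left
  intro p hp
  rcases (PySem.List.mem_enumerate_iff _ _ _).1 hp with ⟨k, hk, rfl⟩
  have h1 : ((l.length : Int) + 1 - (0 + (k : Int))).toNat = ((l.length : Int) - (0 + (k : Int))).toNat + 1 := by omega
  rw [h1, pow_succ]
  ring

theorem pvSum_horner (x : Int) : ∀ (l : List Int),
    pvSum x (l.length : Int) (PySem.List.enumerate l) = x * pvHorner x 0 l := by
  intro l
  induction l using List.reverseRecOn with
  | nil => simp [pvSum, pvHorner, PySem.List.enumerate]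
  | append_singleton l c ih =>
    have he : PySem.List.enumerate (l ++ [c]) =
        PySem.List.enumerate l ++ [((l.length : Int), c)] := by
      rw [PySem.List.enumerate_append]
      simp [PySem.List.enumerate_cons, PySem.List.enumerate_nil]
    have hlen : (((l ++ [c]).length : Int)) = (l.length : Int) + 1 := by simp
    rw [he]
    unfold pvSum
    rw [List.map_append, List.sum_append, hlen]
    have hlast : ((((l.length : Int) + 1) - (l.length : Int)).toNat) = 1 := by omega
    have hmain := pvSum_shift x l
    unfold pvSum at hmain
    unfold pvSum at ih
    rw [hmain, ih]
    simp only [List.map_cons, List.map_nil, List.sum_cons, List.sum_nil, hlast, pow_one]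
    have hh : pvHorner x 0 (l ++ [c]) = pvHorner x 0 l * x + c := by
      simp [pvHorner, List.foldl_append]
    rw [hh]; ring

-- ===== VERDICT (by name: the statement is the Claim_ definition above) =====
theorem check_polynomial_spec : Claim_equal_check_polynomial := by
  intro x block _
  unfold Spec_check_polynomial
  have hA : check_polynomial x block =
      ((PySem.List.enumerate block).foldl (pvStepA x (block.length : Int)) 0 == 0) := rfl
  have hB : check_polynomial_alt x block =
      (PySem.Int.mod ((block.foldl (pvStepB x) 0) * x) (2 ^ 64) == 0) := rfl
  set sA := (PySem.List.enumerate block).foldl (pvStepA x (block.length : Int)) 0 with hsA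
  set hb := block.foldl (pvStepB x) 0 with hhb
  have hAmod : sA % 2 ^ 64 = (x * pvHorner x 0 block) % 2 ^ 64 := by
    have := foldA_emod x (block.length : Int) (PySem.List.enumerate block) 0 0 rfl
    rw [zero_add, pvSum_horner] at this
    exact this
  have hBmod : (hb * x) % 2 ^ 64 = (x * pvHorner x 0 block) % 2 ^ 64 := by
    have h1 := foldB_emod x block 0 0 rfl
    calc (hb * x) % 2 ^ 64 = (pvHorner x 0 block * x) % 2 ^ 64 := Int.ModEq.mul_right x h1
    _ = (x * pvHorner x 0 block) % 2 ^ 64 := by rw [mul_comm]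
  have hiff : (sA = 0) ↔ sA % 2 ^ 64 = 0 := by
    rcases foldA_zero_or_u64 x (block.length : Int) (PySem.List.enumerate block) 0 with h | ⟨y, hy⟩
    · rw [← hsA] at h; rw [h]; norm_num
    · rw [← hsA] at hy
      have hb := pvU64_bounds y
      rw [hy]
      constructor
      · intro h; rw [h]; norm_num
      · intro h
        have hd : (2 ^ 64 : Int) ∣ pvU64 y := Int.dvd_of_emod_eq_zero h
        omega
  rw [hA, hB, PySem.Int.mod_eq_emod_of_pos (show (0:Int) < 2 ^ 64 by norm_num)]
  have : (sA = 0) ↔ (hb * x) % 2 ^ 64 = 0 := by rw [hiff, hAmod, ← hBmod]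
  apply Bool.eq_iff_iff.mpr
  simp only [beq_iff_eq]
  exact this
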